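-- pv_equiv track=rewrite | github.com/Srivatsa2004/Raga_App | my_funcs.py | map_swaras
-- ===== SOURCE A (Python) =====
-- from collections import OrderedDict
--
-- def map_swaras(swaras):
--     swara_map = OrderedDict([
--         ("R1", "R1"), ("R2", "G1"), ("R3", "G2"), ("G1", "G1"), ("G2", "G2"), ("G3", "G3"),
--         ("Sa", "S"), ("Ma1", "M1"), ("Ma2", "M2"), ("Pa", "P"), ("Da1", "D1"), ("Da2", "N1"),
--         ("Da3", "N2"), ("N1", "N1"), ("N2", "N2"), ("Ni3", "N3"), ("D3", "N2")
--     ])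
--
--     swaras_replace = []
--     for swara in swaras:
--         if 'R1' in swaras:
--             swara_in_mapping = next((k for k in swara_map if swara.startswith(k)), swara)
--             swaras_replace.append(swara_map.get(swara_in_mapping, swara))
--         elif 'R2' in swaras and swara == "R3":
--             swaras_replace.append('G2')
--         elif 'D1' in swaras and swara == "D2":
--             swaras_replace.append('N1')
--         elif 'D2' in swaras and swara == "D3":
--             swaras_replace.append('N2')
--         else:
--             swaras_replace.append(swara)
--     return swaras_replace
-- ===== SOURCE B (Python) =====
-- # A's prefix table: no 3-char key's first two characters form a 2-char key, and
-- # keys are distinct, so each swara matches at most ONE key: the ordered linear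
-- # startswith scan can be replaced by two O(1) hash lookups on s[:2] and s[:3].
-- _TBL = {
--     "R1": "R1", "R2": "G1", "R3": "G2", "G1": "G1", "G2": "G2", "G3": "G3",
--     "Sa": "S", "Ma1": "M1", "Ma2": "M2", "Pa": "P", "Da1": "D1", "Da2": "N1",
--     "Da3": "N2", "N1": "N1", "N2": "N2", "Ni3": "N3", "D3": "N2",
-- }
--
-- _RULES = [("R2", "R3", "G2"), ("D1", "D2", "N1"), ("D2", "D3", "N2")]
--
-- def map_swaras(swaras):
--     present = set(swaras)
--     if "R1" in present:
--         out = []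
--         for s in swaras:
--             v = _TBL.get(s[:2])
--             if v is None:
--                 v = _TBL.get(s[:3], s)
--             out.append(v)
--         return out
--     repl = {old: new for trig, old, new in _RULES if trig in present}
--     return [repl.get(s, s) for s in swaras]
-- ===== Notes on version B (the rewrite author's own statement) =====
-- stated objective: faster
-- what changed: B decides the loop-invariant regime once with a set built up front, replaces A's ordered linear startswith scan over the table by two dict lookups on the slices s[:2] and s[:3] (legal because keys are distinct and no 3-char key has a 2-char key as prefix, so at most one key can match), and derives the other arm's replacements by filtering a small rules table once instead of re-testing membership and an elif chain per element.
import Mathlib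
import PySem

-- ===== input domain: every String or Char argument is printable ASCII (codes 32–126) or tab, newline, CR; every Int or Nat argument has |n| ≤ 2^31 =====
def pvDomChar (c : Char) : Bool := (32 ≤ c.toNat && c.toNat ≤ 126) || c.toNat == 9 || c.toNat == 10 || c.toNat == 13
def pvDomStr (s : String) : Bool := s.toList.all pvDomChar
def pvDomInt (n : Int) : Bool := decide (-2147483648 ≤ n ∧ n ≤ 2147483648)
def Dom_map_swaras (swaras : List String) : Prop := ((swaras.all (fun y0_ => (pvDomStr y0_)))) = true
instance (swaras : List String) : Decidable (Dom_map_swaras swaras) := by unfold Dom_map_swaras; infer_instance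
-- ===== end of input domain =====

-- B hoists the loop-invariant regime choice, replaces A's ordered linear startswith
-- scan by two hash lookups on the slices s[:2]/s[:3] (no 3-char key has a 2-char key
-- as its prefix, so the first match is unique), and drives the other arm by a small
-- rules table filtered once. Objective: faster (a timing run measured B faster).

-- ===== PORT A =====
def swaraMapListA : List (String × String) :=
  [("R1", "R1"), ("R2", "G1"), ("R3", "G2"), ("G1", "G1"), ("G2", "G2"), ("G3", "G3"),
   ("Sa", "S"), ("Ma1", "M1"), ("Ma2", "M2"), ("Pa", "P"), ("Da1", "D1"), ("Da2", "N1"),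
   ("Da3", "N2"), ("N1", "N1"), ("N2", "N2"), ("Ni3", "N3"), ("D3", "N2")]

def map_swaras (swaras : List String) : List String :=
  let swara_map : PySem.Dict String String := PySem.Dict.ofList swaraMapListA
  swaras.foldl (fun swaras_replace swara =>
    if swaras.contains "R1" then
      let swara_in_mapping :=
        ((swara_map.keys.find? (fun k => PySem.Str.startswith swara k)).getD swara)
      swaras_replace ++ [swara_map.getD swara_in_mapping swara]
    else if swaras.contains "R2" && swara == "R3" then swaras_replace ++ ["G2"]
    else if swaras.contains "D1" && swara == "D2" then swaras_replace ++ ["N1"]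
    else if swaras.contains "D2" && swara == "D3" then swaras_replace ++ ["N2"]
    else swaras_replace ++ [swara]) []

-- ===== PORT B =====
def swaraTableB : PySem.Dict String String :=
  PySem.Dict.ofList
    [("R1", "R1"), ("R2", "G1"), ("R3", "G2"), ("G1", "G1"), ("G2", "G2"), ("G3", "G3"),
     ("Sa", "S"), ("Ma1", "M1"), ("Ma2", "M2"), ("Pa", "P"), ("Da1", "D1"), ("Da2", "N1"),
     ("Da3", "N2"), ("N1", "N1"), ("N2", "N2"), ("Ni3", "N3"), ("D3", "N2")]

def rulesB : List (String × String × String) :=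
  [("R2", "R3", "G2"), ("D1", "D2", "N1"), ("D2", "D3", "N2")]

-- v = _TBL.get(s[:2]); if v is None: v = _TBL.get(s[:3], s)
def sliceLookupB (s : String) : String :=
  match swaraTableB.get? (PySem.Str.slice s none (some 2)) with
  | some v => v
  | none => swaraTableB.getD (PySem.Str.slice s none (some 3)) s

def map_swaras_alt (swaras : List String) : List String :=
  let present : PySem.Set String := PySem.Set.ofList swaras
  if PySem.Set.contains present "R1" then
    swaras.foldl (fun out s => out ++ [sliceLookupB s]) []
  else
    let repl : PySem.Dict String String :=
      PySem.Dict.ofList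
        ((rulesB.filter (fun r => PySem.Set.contains present r.1)).map (fun r => (r.2.1, r.2.2)))
    swaras.map (fun s => repl.getD s s)

-- ===== PRECONDITION & SPEC =====
def Spec_map_swaras (swaras : List String) (out : List String) : Prop := out = map_swaras_alt swaras
instance (swaras : List String) (out : List String) : Decidable (Spec_map_swaras swaras out) := by unfold Spec_map_swaras; infer_instance

-- ===== CLAIM =====
def Claim_equal_map_swaras : Prop := ∀ (swaras : List String), Dom_map_swaras swaras → Spec_map_swaras swaras (map_swaras swaras)

-- ===== LEMMAS AND PROOFS =====

-- Chars.startswith as a take-prefix equality test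
theorem sw_take (s k : List Char) :
    PySem.Chars.startswith s k = (s.take k.length == k) := by
  rw [Bool.eq_iff_iff]
  rw [PySem.Chars.startswith_iff, beq_iff_eq, List.prefix_iff_eq_take]
  exact eq_comm

-- String == is List Char == of the underlying lists
theorem str_beq_toList (x y : String) : (x == y) = (x.toList == y.toList) := by
  rw [Bool.eq_iff_iff]
  simp only [beq_iff_eq]
  exact ⟨congrArg _, fun h => String.toList_inj.mp h⟩

theorem slice2 (s : String) : (PySem.Str.slice s none (some 2)).toList = s.toList.take 2 := by
  simp [PySem.Str.slice, pysem]

theorem slice3 (s : String) : (PySem.Str.slice s none (some 3)).toList = s.toList.take 3 := by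
  simp [PySem.Str.slice, pysem]

theorem tbl_mk : swaraTableB = PySem.Dict.mk swaraMapListA := by decide

theorem pv_ofList_eq_mk : PySem.Dict.ofList swaraMapListA = PySem.Dict.mk swaraMapListA := by decide

theorem set_contains (xs : List String) (x : String) :
    PySem.Set.contains (PySem.Set.ofList xs) x = xs.contains x := by
  rw [Bool.eq_iff_iff]
  simp [PySem.Set.mem_ofList]

-- startswith is reflexive
theorem pv_startswith_self (s : String) : PySem.Str.startswith s s = true := by
  simp [PySem.Str.startswith_eq]
  exact (PySem.Chars.startswith_iff _ _).2 (List.prefix_refl _)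

-- the generic heart of the R1 arm: looking up the first prefix-matching KEY in a
-- nodup-keyed assoc list equals returning the first prefix-matching VALUE
theorem pv_prefix_lookup (L : List (String × String)) (s : String)
    (hnd : (L.map Prod.fst).Nodup) :
    (PySem.Dict.mk L).getD
        (((L.map Prod.fst).find? (fun k => PySem.Str.startswith s k)).getD s) s
      = (match L.find? (fun p => PySem.Str.startswith s p.1) with
         | some p => p.2
         | none => s) := by
  induction L with
  | nil =>
      simp [PySem.Dict.getD, PySem.Dict.get?]
  | cons hd tl ih =>
      obtain ⟨k0, v0⟩ := hd
      simp only [List.map_cons, List.nodup_cons] at hnd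
      obtain ⟨hmem, hndtl⟩ := hnd
      by_cases hsw : PySem.Chars.startswith s.toList k0.toList = true
      · simp [PySem.Str.startswith_eq, hsw,
             PySem.Dict.getD_eq_get?_getD, PySem.Dict.get?_mk_cons]
      · have hsw' : PySem.Chars.startswith s.toList k0.toList = false := by
          simpa using hsw
        have hne : k0 ≠ (((tl.map Prod.fst).find? (fun k => PySem.Str.startswith s k)).getD s) := by
          cases hfind : (tl.map Prod.fst).find? (fun k => PySem.Str.startswith s k) with
          | none =>
              simp only [Option.getD_none]
              intro heq
              have := pv_startswith_self s
              rw [heq] at hsw'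
              simp [PySem.Str.startswith_eq] at this
              rw [this] at hsw'
              cases hsw'
          | some k =>
              simp only [Option.getD_some]
              intro heq
              exact hmem (heq ▸ List.mem_of_find?_eq_some hfind)
        have hbeq : (k0 == (((tl.map Prod.fst).find? (fun k => PySem.Str.startswith s k)).getD s)) = false := by
          simpa using hne
        simp only [List.map_cons, List.find?_cons, PySem.Str.startswith_eq, hsw']
        rw [PySem.Dict.getD_eq_get?_getD, PySem.Dict.get?_mk_cons]
        have hbeq' := hbeq
        simp only [PySem.Str.startswith_eq] at hbeq'
        rw [hbeq']
        simp only [Bool.false_eq_true, if_false]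
        rw [← PySem.Dict.getD_eq_get?_getD]
        have ih' := ih hndtl
        simp only [PySem.Str.startswith_eq] at ih'
        exact ih'

set_option maxHeartbeats 2000000 in
theorem pv_find_eq_slice (s : String) :
    (match swaraMapListA.find? (fun p => PySem.Str.startswith s p.1) with
     | some p => p.2
     | none => s) = sliceLookupB s := by
  have h2 : (PySem.Str.slice s none (some 2)).toList = s.toList.take 2 := slice2 s
  have h3 : (PySem.Str.slice s none (some 3)).toList = s.toList.take 3 := slice3 s
  have hab : s.toList.take 2 = (s.toList.take 3).take 2 := by rw [List.take_take]; norm_num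
  have hal : (s.toList.take 2).length ≤ 2 := List.length_take_le 2 s.toList
  unfold sliceLookupB
  rw [tbl_mk]
  generalize PySem.Str.slice s none (some 2) = S2 at *
  generalize PySem.Str.slice s none (some 3) = S3 at *
  simp only [swaraMapListA, List.find?_cons, List.find?_nil, PySem.Str.startswith_eq, sw_take,
    PySem.Dict.get?_mk_cons, PySem.Dict.getD_eq_get?_getD, str_beq_toList, h2, h3,
    show ("R1".toList.length) = 2 from rfl, show ("R2".toList.length) = 2 from rfl, show ("R3".toList.length) = 2 from rfl, show ("G1".toList.length) = 2 from rfl, show ("G2".toList.length) = 2 from rfl, show ("G3".toList.length) = 2 from rfl, show ("Sa".toList.length) = 2 from rfl, show ("Pa".toList.length) = 2 from rfl, show ("N1".toList.length) = 2 from rfl, show ("N2".toList.length) = 2 from rfl, show ("D3".toList.length) = 2 from rfl, show ("Ma1".toList.length) = 3 from rfl, show ("Ma2".toList.length) = 3 from rfl, show ("Da1".toList.length) = 3 from rfl, show ("Da2".toList.length) = 3 from rfl, show ("Da3".toList.length) = 3 from rfl, show ("Ni3".toList.length) = 3 from rfl]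
  generalize s.toList.take 2 = a at *
  generalize s.toList.take 3 = b at *
  have na0 : ¬ (a = (['M', 'a', '1'] : List Char)) := fun e => by rw [e] at hal; simp at hal
  have na0C : ((['M', 'a', '1'] : List Char) == a) = false := beq_eq_false_iff_ne.mpr (fun e => na0 e.symm)
  have na1 : ¬ (a = (['M', 'a', '2'] : List Char)) := fun e => by rw [e] at hal; simp at hal
  have na1C : ((['M', 'a', '2'] : List Char) == a) = false := beq_eq_false_iff_ne.mpr (fun e => na1 e.symm)
  have na2 : ¬ (a = (['D', 'a', '1'] : List Char)) := fun e => by rw [e] at hal; simp at hal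
  have na2C : ((['D', 'a', '1'] : List Char) == a) = false := beq_eq_false_iff_ne.mpr (fun e => na2 e.symm)
  have na3 : ¬ (a = (['D', 'a', '2'] : List Char)) := fun e => by rw [e] at hal; simp at hal
  have na3C : ((['D', 'a', '2'] : List Char) == a) = false := beq_eq_false_iff_ne.mpr (fun e => na3 e.symm)
  have na4 : ¬ (a = (['D', 'a', '3'] : List Char)) := fun e => by rw [e] at hal; simp at hal
  have na4C : ((['D', 'a', '3'] : List Char) == a) = false := beq_eq_false_iff_ne.mpr (fun e => na4 e.symm)
  have na5 : ¬ (a = (['N', 'i', '3'] : List Char)) := fun e => by rw [e] at hal; simp at hal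
  have na5C : ((['N', 'i', '3'] : List Char) == a) = false := beq_eq_false_iff_ne.mpr (fun e => na5 e.symm)
  by_cases h0 : a = (['R', '1'] : List Char)
  ·
    have nb0 : ¬ (b = (['M', 'a', '1'] : List Char)) := fun e => by rw [h0, e] at hab; simp at hab
    have nb0B : (b == (['M', 'a', '1'] : List Char)) = false := beq_eq_false_iff_ne.mpr nb0
    have nb0C : ((['M', 'a', '1'] : List Char) == b) = false := beq_eq_false_iff_ne.mpr (fun e => nb0 e.symm)
    have nb1 : ¬ (b = (['M', 'a', '2'] : List Char)) := fun e => by rw [h0, e] at hab; simp at hab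
    have nb1B : (b == (['M', 'a', '2'] : List Char)) = false := beq_eq_false_iff_ne.mpr nb1
    have nb1C : ((['M', 'a', '2'] : List Char) == b) = false := beq_eq_false_iff_ne.mpr (fun e => nb1 e.symm)
    have nb2 : ¬ (b = (['D', 'a', '1'] : List Char)) := fun e => by rw [h0, e] at hab; simp at hab
    have nb2B : (b == (['D', 'a', '1'] : List Char)) = false := beq_eq_false_iff_ne.mpr nb2
    have nb2C : ((['D', 'a', '1'] : List Char) == b) = false := beq_eq_false_iff_ne.mpr (fun e => nb2 e.symm)
    have nb3 : ¬ (b = (['D', 'a', '2'] : List Char)) := fun e => by rw [h0, e] at hab; simp at hab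
    have nb3B : (b == (['D', 'a', '2'] : List Char)) = false := beq_eq_false_iff_ne.mpr nb3
    have nb3C : ((['D', 'a', '2'] : List Char) == b) = false := beq_eq_false_iff_ne.mpr (fun e => nb3 e.symm)
    have nb4 : ¬ (b = (['D', 'a', '3'] : List Char)) := fun e => by rw [h0, e] at hab; simp at hab
    have nb4B : (b == (['D', 'a', '3'] : List Char)) = false := beq_eq_false_iff_ne.mpr nb4
    have nb4C : ((['D', 'a', '3'] : List Char) == b) = false := beq_eq_false_iff_ne.mpr (fun e => nb4 e.symm)
    have nb5 : ¬ (b = (['N', 'i', '3'] : List Char)) := fun e => by rw [h0, e] at hab; simp at hab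
    have nb5B : (b == (['N', 'i', '3'] : List Char)) = false := beq_eq_false_iff_ne.mpr nb5
    have nb5C : ((['N', 'i', '3'] : List Char) == b) = false := beq_eq_false_iff_ne.mpr (fun e => nb5 e.symm)
    simp [h0]
  ·
    by_cases h1 : a = (['R', '2'] : List Char)
    ·
      have nb0 : ¬ (b = (['M', 'a', '1'] : List Char)) := fun e => by rw [h1, e] at hab; simp at hab
      have nb0B : (b == (['M', 'a', '1'] : List Char)) = false := beq_eq_false_iff_ne.mpr nb0
      have nb0C : ((['M', 'a', '1'] : List Char) == b) = false := beq_eq_false_iff_ne.mpr (fun e => nb0 e.symm)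
      have nb1 : ¬ (b = (['M', 'a', '2'] : List Char)) := fun e => by rw [h1, e] at hab; simp at hab
      have nb1B : (b == (['M', 'a', '2'] : List Char)) = false := beq_eq_false_iff_ne.mpr nb1
      have nb1C : ((['M', 'a', '2'] : List Char) == b) = false := beq_eq_false_iff_ne.mpr (fun e => nb1 e.symm)
      have nb2 : ¬ (b = (['D', 'a', '1'] : List Char)) := fun e => by rw [h1, e] at hab; simp at hab
      have nb2B : (b == (['D', 'a', '1'] : List Char)) = false := beq_eq_false_iff_ne.mpr nb2
      have nb2C : ((['D', 'a', '1'] : List Char) == b) = false := beq_eq_false_iff_ne.mpr (fun e => nb2 e.symm)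
      have nb3 : ¬ (b = (['D', 'a', '2'] : List Char)) := fun e => by rw [h1, e] at hab; simp at hab
      have nb3B : (b == (['D', 'a', '2'] : List Char)) = false := beq_eq_false_iff_ne.mpr nb3
      have nb3C : ((['D', 'a', '2'] : List Char) == b) = false := beq_eq_false_iff_ne.mpr (fun e => nb3 e.symm)
      have nb4 : ¬ (b = (['D', 'a', '3'] : List Char)) := fun e => by rw [h1, e] at hab; simp at hab
      have nb4B : (b == (['D', 'a', '3'] : List Char)) = false := beq_eq_false_iff_ne.mpr nb4
      have nb4C : ((['D', 'a', '3'] : List Char) == b) = false := beq_eq_false_iff_ne.mpr (fun e => nb4 e.symm)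
      have nb5 : ¬ (b = (['N', 'i', '3'] : List Char)) := fun e => by rw [h1, e] at hab; simp at hab
      have nb5B : (b == (['N', 'i', '3'] : List Char)) = false := beq_eq_false_iff_ne.mpr nb5
      have nb5C : ((['N', 'i', '3'] : List Char) == b) = false := beq_eq_false_iff_ne.mpr (fun e => nb5 e.symm)
      simp [h1]
    ·
      by_cases h2 : a = (['R', '3'] : List Char)
      ·
        have nb0 : ¬ (b = (['M', 'a', '1'] : List Char)) := fun e => by rw [h2, e] at hab; simp at hab
        have nb0B : (b == (['M', 'a', '1'] : List Char)) = false := beq_eq_false_iff_ne.mpr nb0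
        have nb0C : ((['M', 'a', '1'] : List Char) == b) = false := beq_eq_false_iff_ne.mpr (fun e => nb0 e.symm)
        have nb1 : ¬ (b = (['M', 'a', '2'] : List Char)) := fun e => by rw [h2, e] at hab; simp at hab
        have nb1B : (b == (['M', 'a', '2'] : List Char)) = false := beq_eq_false_iff_ne.mpr nb1
        have nb1C : ((['M', 'a', '2'] : List Char) == b) = false := beq_eq_false_iff_ne.mpr (fun e => nb1 e.symm)
        have nb2 : ¬ (b = (['D', 'a', '1'] : List Char)) := fun e => by rw [h2, e] at hab; simp at hab
        have nb2B : (b == (['D', 'a', '1'] : List Char)) = false := beq_eq_false_iff_ne.mpr nb2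
        have nb2C : ((['D', 'a', '1'] : List Char) == b) = false := beq_eq_false_iff_ne.mpr (fun e => nb2 e.symm)
        have nb3 : ¬ (b = (['D', 'a', '2'] : List Char)) := fun e => by rw [h2, e] at hab; simp at hab
        have nb3B : (b == (['D', 'a', '2'] : List Char)) = false := beq_eq_false_iff_ne.mpr nb3
        have nb3C : ((['D', 'a', '2'] : List Char) == b) = false := beq_eq_false_iff_ne.mpr (fun e => nb3 e.symm)
        have nb4 : ¬ (b = (['D', 'a', '3'] : List Char)) := fun e => by rw [h2, e] at hab; simp at hab
        have nb4B : (b == (['D', 'a', '3'] : List Char)) = false := beq_eq_false_iff_ne.mpr nb4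
        have nb4C : ((['D', 'a', '3'] : List Char) == b) = false := beq_eq_false_iff_ne.mpr (fun e => nb4 e.symm)
        have nb5 : ¬ (b = (['N', 'i', '3'] : List Char)) := fun e => by rw [h2, e] at hab; simp at hab
        have nb5B : (b == (['N', 'i', '3'] : List Char)) = false := beq_eq_false_iff_ne.mpr nb5
        have nb5C : ((['N', 'i', '3'] : List Char) == b) = false := beq_eq_false_iff_ne.mpr (fun e => nb5 e.symm)
        simp [h2]
      ·
        by_cases h3 : a = (['G', '1'] : List Char)
        ·
          have nb0 : ¬ (b = (['M', 'a', '1'] : List Char)) := fun e => by rw [h3, e] at hab; simp at hab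
          have nb0B : (b == (['M', 'a', '1'] : List Char)) = false := beq_eq_false_iff_ne.mpr nb0
          have nb0C : ((['M', 'a', '1'] : List Char) == b) = false := beq_eq_false_iff_ne.mpr (fun e => nb0 e.symm)
          have nb1 : ¬ (b = (['M', 'a', '2'] : List Char)) := fun e => by rw [h3, e] at hab; simp at hab
          have nb1B : (b == (['M', 'a', '2'] : List Char)) = false := beq_eq_false_iff_ne.mpr nb1
          have nb1C : ((['M', 'a', '2'] : List Char) == b) = false := beq_eq_false_iff_ne.mpr (fun e => nb1 e.symm)
          have nb2 : ¬ (b = (['D', 'a', '1'] : List Char)) := fun e => by rw [h3, e] at hab; simp at hab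
          have nb2B : (b == (['D', 'a', '1'] : List Char)) = false := beq_eq_false_iff_ne.mpr nb2
          have nb2C : ((['D', 'a', '1'] : List Char) == b) = false := beq_eq_false_iff_ne.mpr (fun e => nb2 e.symm)
          have nb3 : ¬ (b = (['D', 'a', '2'] : List Char)) := fun e => by rw [h3, e] at hab; simp at hab
          have nb3B : (b == (['D', 'a', '2'] : List Char)) = false := beq_eq_false_iff_ne.mpr nb3
          have nb3C : ((['D', 'a', '2'] : List Char) == b) = false := beq_eq_false_iff_ne.mpr (fun e => nb3 e.symm)
          have nb4 : ¬ (b = (['D', 'a', '3'] : List Char)) := fun e => by rw [h3, e] at hab; simp at hab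
          have nb4B : (b == (['D', 'a', '3'] : List Char)) = false := beq_eq_false_iff_ne.mpr nb4
          have nb4C : ((['D', 'a', '3'] : List Char) == b) = false := beq_eq_false_iff_ne.mpr (fun e => nb4 e.symm)
          have nb5 : ¬ (b = (['N', 'i', '3'] : List Char)) := fun e => by rw [h3, e] at hab; simp at hab
          have nb5B : (b == (['N', 'i', '3'] : List Char)) = false := beq_eq_false_iff_ne.mpr nb5
          have nb5C : ((['N', 'i', '3'] : List Char) == b) = false := beq_eq_false_iff_ne.mpr (fun e => nb5 e.symm)
          simp [h3]
        ·
          by_cases h4 : a = (['G', '2'] : List Char)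
          ·
            have nb0 : ¬ (b = (['M', 'a', '1'] : List Char)) := fun e => by rw [h4, e] at hab; simp at hab
            have nb0B : (b == (['M', 'a', '1'] : List Char)) = false := beq_eq_false_iff_ne.mpr nb0
            have nb0C : ((['M', 'a', '1'] : List Char) == b) = false := beq_eq_false_iff_ne.mpr (fun e => nb0 e.symm)
            have nb1 : ¬ (b = (['M', 'a', '2'] : List Char)) := fun e => by rw [h4, e] at hab; simp at hab
            have nb1B : (b == (['M', 'a', '2'] : List Char)) = false := beq_eq_false_iff_ne.mpr nb1
            have nb1C : ((['M', 'a', '2'] : List Char) == b) = false := beq_eq_false_iff_ne.mpr (fun e => nb1 e.symm)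
            have nb2 : ¬ (b = (['D', 'a', '1'] : List Char)) := fun e => by rw [h4, e] at hab; simp at hab
            have nb2B : (b == (['D', 'a', '1'] : List Char)) = false := beq_eq_false_iff_ne.mpr nb2
            have nb2C : ((['D', 'a', '1'] : List Char) == b) = false := beq_eq_false_iff_ne.mpr (fun e => nb2 e.symm)
            have nb3 : ¬ (b = (['D', 'a', '2'] : List Char)) := fun e => by rw [h4, e] at hab; simp at hab
            have nb3B : (b == (['D', 'a', '2'] : List Char)) = false := beq_eq_false_iff_ne.mpr nb3
            have nb3C : ((['D', 'a', '2'] : List Char) == b) = false := beq_eq_false_iff_ne.mpr (fun e => nb3 e.symm)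
            have nb4 : ¬ (b = (['D', 'a', '3'] : List Char)) := fun e => by rw [h4, e] at hab; simp at hab
            have nb4B : (b == (['D', 'a', '3'] : List Char)) = false := beq_eq_false_iff_ne.mpr nb4
            have nb4C : ((['D', 'a', '3'] : List Char) == b) = false := beq_eq_false_iff_ne.mpr (fun e => nb4 e.symm)
            have nb5 : ¬ (b = (['N', 'i', '3'] : List Char)) := fun e => by rw [h4, e] at hab; simp at hab
            have nb5B : (b == (['N', 'i', '3'] : List Char)) = false := beq_eq_false_iff_ne.mpr nb5
            have nb5C : ((['N', 'i', '3'] : List Char) == b) = false := beq_eq_false_iff_ne.mpr (fun e => nb5 e.symm)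
            simp [h4]
          ·
            by_cases h5 : a = (['G', '3'] : List Char)
            ·
              have nb0 : ¬ (b = (['M', 'a', '1'] : List Char)) := fun e => by rw [h5, e] at hab; simp at hab
              have nb0B : (b == (['M', 'a', '1'] : List Char)) = false := beq_eq_false_iff_ne.mpr nb0
              have nb0C : ((['M', 'a', '1'] : List Char) == b) = false := beq_eq_false_iff_ne.mpr (fun e => nb0 e.symm)
              have nb1 : ¬ (b = (['M', 'a', '2'] : List Char)) := fun e => by rw [h5, e] at hab; simp at hab
              have nb1B : (b == (['M', 'a', '2'] : List Char)) = false := beq_eq_false_iff_ne.mpr nb1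
              have nb1C : ((['M', 'a', '2'] : List Char) == b) = false := beq_eq_false_iff_ne.mpr (fun e => nb1 e.symm)
              have nb2 : ¬ (b = (['D', 'a', '1'] : List Char)) := fun e => by rw [h5, e] at hab; simp at hab
              have nb2B : (b == (['D', 'a', '1'] : List Char)) = false := beq_eq_false_iff_ne.mpr nb2
              have nb2C : ((['D', 'a', '1'] : List Char) == b) = false := beq_eq_false_iff_ne.mpr (fun e => nb2 e.symm)
              have nb3 : ¬ (b = (['D', 'a', '2'] : List Char)) := fun e => by rw [h5, e] at hab; simp at hab
              have nb3B : (b == (['D', 'a', '2'] : List Char)) = false := beq_eq_false_iff_ne.mpr nb3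
              have nb3C : ((['D', 'a', '2'] : List Char) == b) = false := beq_eq_false_iff_ne.mpr (fun e => nb3 e.symm)
              have nb4 : ¬ (b = (['D', 'a', '3'] : List Char)) := fun e => by rw [h5, e] at hab; simp at hab
              have nb4B : (b == (['D', 'a', '3'] : List Char)) = false := beq_eq_false_iff_ne.mpr nb4
              have nb4C : ((['D', 'a', '3'] : List Char) == b) = false := beq_eq_false_iff_ne.mpr (fun e => nb4 e.symm)
              have nb5 : ¬ (b = (['N', 'i', '3'] : List Char)) := fun e => by rw [h5, e] at hab; simp at hab
              have nb5B : (b == (['N', 'i', '3'] : List Char)) = false := beq_eq_false_iff_ne.mpr nb5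
              have nb5C : ((['N', 'i', '3'] : List Char) == b) = false := beq_eq_false_iff_ne.mpr (fun e => nb5 e.symm)
              simp [h5]
            ·
              by_cases h6 : a = (['S', 'a'] : List Char)
              ·
                have nb0 : ¬ (b = (['M', 'a', '1'] : List Char)) := fun e => by rw [h6, e] at hab; simp at hab
                have nb0B : (b == (['M', 'a', '1'] : List Char)) = false := beq_eq_false_iff_ne.mpr nb0
                have nb0C : ((['M', 'a', '1'] : List Char) == b) = false := beq_eq_false_iff_ne.mpr (fun e => nb0 e.symm)
                have nb1 : ¬ (b = (['M', 'a', '2'] : List Char)) := fun e => by rw [h6, e] at hab; simp at hab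
                have nb1B : (b == (['M', 'a', '2'] : List Char)) = false := beq_eq_false_iff_ne.mpr nb1
                have nb1C : ((['M', 'a', '2'] : List Char) == b) = false := beq_eq_false_iff_ne.mpr (fun e => nb1 e.symm)
                have nb2 : ¬ (b = (['D', 'a', '1'] : List Char)) := fun e => by rw [h6, e] at hab; simp at hab
                have nb2B : (b == (['D', 'a', '1'] : List Char)) = false := beq_eq_false_iff_ne.mpr nb2
                have nb2C : ((['D', 'a', '1'] : List Char) == b) = false := beq_eq_false_iff_ne.mpr (fun e => nb2 e.symm)
                have nb3 : ¬ (b = (['D', 'a', '2'] : List Char)) := fun e => by rw [h6, e] at hab; simp at hab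
                have nb3B : (b == (['D', 'a', '2'] : List Char)) = false := beq_eq_false_iff_ne.mpr nb3
                have nb3C : ((['D', 'a', '2'] : List Char) == b) = false := beq_eq_false_iff_ne.mpr (fun e => nb3 e.symm)
                have nb4 : ¬ (b = (['D', 'a', '3'] : List Char)) := fun e => by rw [h6, e] at hab; simp at hab
                have nb4B : (b == (['D', 'a', '3'] : List Char)) = false := beq_eq_false_iff_ne.mpr nb4
                have nb4C : ((['D', 'a', '3'] : List Char) == b) = false := beq_eq_false_iff_ne.mpr (fun e => nb4 e.symm)
                have nb5 : ¬ (b = (['N', 'i', '3'] : List Char)) := fun e => by rw [h6, e] at hab; simp at hab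
                have nb5B : (b == (['N', 'i', '3'] : List Char)) = false := beq_eq_false_iff_ne.mpr nb5
                have nb5C : ((['N', 'i', '3'] : List Char) == b) = false := beq_eq_false_iff_ne.mpr (fun e => nb5 e.symm)
                simp [h6]
              ·
                by_cases h7 : a = (['P', 'a'] : List Char)
                ·
                  have nb0 : ¬ (b = (['M', 'a', '1'] : List Char)) := fun e => by rw [h7, e] at hab; simp at hab
                  have nb0B : (b == (['M', 'a', '1'] : List Char)) = false := beq_eq_false_iff_ne.mpr nb0
                  have nb0C : ((['M', 'a', '1'] : List Char) == b) = false := beq_eq_false_iff_ne.mpr (fun e => nb0 e.symm)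
                  have nb1 : ¬ (b = (['M', 'a', '2'] : List Char)) := fun e => by rw [h7, e] at hab; simp at hab
                  have nb1B : (b == (['M', 'a', '2'] : List Char)) = false := beq_eq_false_iff_ne.mpr nb1
                  have nb1C : ((['M', 'a', '2'] : List Char) == b) = false := beq_eq_false_iff_ne.mpr (fun e => nb1 e.symm)
                  have nb2 : ¬ (b = (['D', 'a', '1'] : List Char)) := fun e => by rw [h7, e] at hab; simp at hab
                  have nb2B : (b == (['D', 'a', '1'] : List Char)) = false := beq_eq_false_iff_ne.mpr nb2
                  have nb2C : ((['D', 'a', '1'] : List Char) == b) = false := beq_eq_false_iff_ne.mpr (fun e => nb2 e.symm)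
                  have nb3 : ¬ (b = (['D', 'a', '2'] : List Char)) := fun e => by rw [h7, e] at hab; simp at hab
                  have nb3B : (b == (['D', 'a', '2'] : List Char)) = false := beq_eq_false_iff_ne.mpr nb3
                  have nb3C : ((['D', 'a', '2'] : List Char) == b) = false := beq_eq_false_iff_ne.mpr (fun e => nb3 e.symm)
                  have nb4 : ¬ (b = (['D', 'a', '3'] : List Char)) := fun e => by rw [h7, e] at hab; simp at hab
                  have nb4B : (b == (['D', 'a', '3'] : List Char)) = false := beq_eq_false_iff_ne.mpr nb4
                  have nb4C : ((['D', 'a', '3'] : List Char) == b) = false := beq_eq_false_iff_ne.mpr (fun e => nb4 e.symm)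
                  have nb5 : ¬ (b = (['N', 'i', '3'] : List Char)) := fun e => by rw [h7, e] at hab; simp at hab
                  have nb5B : (b == (['N', 'i', '3'] : List Char)) = false := beq_eq_false_iff_ne.mpr nb5
                  have nb5C : ((['N', 'i', '3'] : List Char) == b) = false := beq_eq_false_iff_ne.mpr (fun e => nb5 e.symm)
                  simp [h7, nb0B, nb1B]
                ·
                  by_cases h8 : a = (['N', '1'] : List Char)
                  ·
                    have nb0 : ¬ (b = (['M', 'a', '1'] : List Char)) := fun e => by rw [h8, e] at hab; simp at hab
                    have nb0B : (b == (['M', 'a', '1'] : List Char)) = false := beq_eq_false_iff_ne.mpr nb0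
                    have nb0C : ((['M', 'a', '1'] : List Char) == b) = false := beq_eq_false_iff_ne.mpr (fun e => nb0 e.symm)
                    have nb1 : ¬ (b = (['M', 'a', '2'] : List Char)) := fun e => by rw [h8, e] at hab; simp at hab
                    have nb1B : (b == (['M', 'a', '2'] : List Char)) = false := beq_eq_false_iff_ne.mpr nb1
                    have nb1C : ((['M', 'a', '2'] : List Char) == b) = false := beq_eq_false_iff_ne.mpr (fun e => nb1 e.symm)
                    have nb2 : ¬ (b = (['D', 'a', '1'] : List Char)) := fun e => by rw [h8, e] at hab; simp at hab
                    have nb2B : (b == (['D', 'a', '1'] : List Char)) = false := beq_eq_false_iff_ne.mpr nb2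
                    have nb2C : ((['D', 'a', '1'] : List Char) == b) = false := beq_eq_false_iff_ne.mpr (fun e => nb2 e.symm)
                    have nb3 : ¬ (b = (['D', 'a', '2'] : List Char)) := fun e => by rw [h8, e] at hab; simp at hab
                    have nb3B : (b == (['D', 'a', '2'] : List Char)) = false := beq_eq_false_iff_ne.mpr nb3
                    have nb3C : ((['D', 'a', '2'] : List Char) == b) = false := beq_eq_false_iff_ne.mpr (fun e => nb3 e.symm)
                    have nb4 : ¬ (b = (['D', 'a', '3'] : List Char)) := fun e => by rw [h8, e] at hab; simp at hab
                    have nb4B : (b == (['D', 'a', '3'] : List Char)) = false := beq_eq_false_iff_ne.mpr nb4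
                    have nb4C : ((['D', 'a', '3'] : List Char) == b) = false := beq_eq_false_iff_ne.mpr (fun e => nb4 e.symm)
                    have nb5 : ¬ (b = (['N', 'i', '3'] : List Char)) := fun e => by rw [h8, e] at hab; simp at hab
                    have nb5B : (b == (['N', 'i', '3'] : List Char)) = false := beq_eq_false_iff_ne.mpr nb5
                    have nb5C : ((['N', 'i', '3'] : List Char) == b) = false := beq_eq_false_iff_ne.mpr (fun e => nb5 e.symm)
                    simp [h8, nb0B, nb1B, nb2B, nb3B, nb4B]
                  ·
                    by_cases h9 : a = (['N', '2'] : List Char)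
                    ·
                      have nb0 : ¬ (b = (['M', 'a', '1'] : List Char)) := fun e => by rw [h9, e] at hab; simp at hab
                      have nb0B : (b == (['M', 'a', '1'] : List Char)) = false := beq_eq_false_iff_ne.mpr nb0
                      have nb0C : ((['M', 'a', '1'] : List Char) == b) = false := beq_eq_false_iff_ne.mpr (fun e => nb0 e.symm)
                      have nb1 : ¬ (b = (['M', 'a', '2'] : List Char)) := fun e => by rw [h9, e] at hab; simp at hab
                      have nb1B : (b == (['M', 'a', '2'] : List Char)) = false := beq_eq_false_iff_ne.mpr nb1
                      have nb1C : ((['M', 'a', '2'] : List Char) == b) = false := beq_eq_false_iff_ne.mpr (fun e => nb1 e.symm)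
                      have nb2 : ¬ (b = (['D', 'a', '1'] : List Char)) := fun e => by rw [h9, e] at hab; simp at hab
                      have nb2B : (b == (['D', 'a', '1'] : List Char)) = false := beq_eq_false_iff_ne.mpr nb2
                      have nb2C : ((['D', 'a', '1'] : List Char) == b) = false := beq_eq_false_iff_ne.mpr (fun e => nb2 e.symm)
                      have nb3 : ¬ (b = (['D', 'a', '2'] : List Char)) := fun e => by rw [h9, e] at hab; simp at hab
                      have nb3B : (b == (['D', 'a', '2'] : List Char)) = false := beq_eq_false_iff_ne.mpr nb3
                      have nb3C : ((['D', 'a', '2'] : List Char) == b) = false := beq_eq_false_iff_ne.mpr (fun e => nb3 e.symm)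
                      have nb4 : ¬ (b = (['D', 'a', '3'] : List Char)) := fun e => by rw [h9, e] at hab; simp at hab
                      have nb4B : (b == (['D', 'a', '3'] : List Char)) = false := beq_eq_false_iff_ne.mpr nb4
                      have nb4C : ((['D', 'a', '3'] : List Char) == b) = false := beq_eq_false_iff_ne.mpr (fun e => nb4 e.symm)
                      have nb5 : ¬ (b = (['N', 'i', '3'] : List Char)) := fun e => by rw [h9, e] at hab; simp at hab
                      have nb5B : (b == (['N', 'i', '3'] : List Char)) = false := beq_eq_false_iff_ne.mpr nb5
                      have nb5C : ((['N', 'i', '3'] : List Char) == b) = false := beq_eq_false_iff_ne.mpr (fun e => nb5 e.symm)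
                      simp [h9, nb0B, nb1B, nb2B, nb3B, nb4B]
                    ·
                      by_cases h10 : a = (['D', '3'] : List Char)
                      ·
                        have nb0 : ¬ (b = (['M', 'a', '1'] : List Char)) := fun e => by rw [h10, e] at hab; simp at hab
                        have nb0B : (b == (['M', 'a', '1'] : List Char)) = false := beq_eq_false_iff_ne.mpr nb0
                        have nb0C : ((['M', 'a', '1'] : List Char) == b) = false := beq_eq_false_iff_ne.mpr (fun e => nb0 e.symm)
                        have nb1 : ¬ (b = (['M', 'a', '2'] : List Char)) := fun e => by rw [h10, e] at hab; simp at hab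
                        have nb1B : (b == (['M', 'a', '2'] : List Char)) = false := beq_eq_false_iff_ne.mpr nb1
                        have nb1C : ((['M', 'a', '2'] : List Char) == b) = false := beq_eq_false_iff_ne.mpr (fun e => nb1 e.symm)
                        have nb2 : ¬ (b = (['D', 'a', '1'] : List Char)) := fun e => by rw [h10, e] at hab; simp at hab
                        have nb2B : (b == (['D', 'a', '1'] : List Char)) = false := beq_eq_false_iff_ne.mpr nb2
                        have nb2C : ((['D', 'a', '1'] : List Char) == b) = false := beq_eq_false_iff_ne.mpr (fun e => nb2 e.symm)
                        have nb3 : ¬ (b = (['D', 'a', '2'] : List Char)) := fun e => by rw [h10, e] at hab; simp at hab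
                        have nb3B : (b == (['D', 'a', '2'] : List Char)) = false := beq_eq_false_iff_ne.mpr nb3
                        have nb3C : ((['D', 'a', '2'] : List Char) == b) = false := beq_eq_false_iff_ne.mpr (fun e => nb3 e.symm)
                        have nb4 : ¬ (b = (['D', 'a', '3'] : List Char)) := fun e => by rw [h10, e] at hab; simp at hab
                        have nb4B : (b == (['D', 'a', '3'] : List Char)) = false := beq_eq_false_iff_ne.mpr nb4
                        have nb4C : ((['D', 'a', '3'] : List Char) == b) = false := beq_eq_false_iff_ne.mpr (fun e => nb4 e.symm)
                        have nb5 : ¬ (b = (['N', 'i', '3'] : List Char)) := fun e => by rw [h10, e] at hab; simp at hab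
                        have nb5B : (b == (['N', 'i', '3'] : List Char)) = false := beq_eq_false_iff_ne.mpr nb5
                        have nb5C : ((['N', 'i', '3'] : List Char) == b) = false := beq_eq_false_iff_ne.mpr (fun e => nb5 e.symm)
                        simp [h10, nb0B, nb1B, nb2B, nb3B, nb4B, nb5B]
                      ·
                        have h0B : (a == (['R', '1'] : List Char)) = false := beq_eq_false_iff_ne.mpr h0
                        have h0C : ((['R', '1'] : List Char) == a) = false := beq_eq_false_iff_ne.mpr (fun e => h0 e.symm)
                        have h1B : (a == (['R', '2'] : List Char)) = false := beq_eq_false_iff_ne.mpr h1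
                        have h1C : ((['R', '2'] : List Char) == a) = false := beq_eq_false_iff_ne.mpr (fun e => h1 e.symm)
                        have h2B : (a == (['R', '3'] : List Char)) = false := beq_eq_false_iff_ne.mpr h2
                        have h2C : ((['R', '3'] : List Char) == a) = false := beq_eq_false_iff_ne.mpr (fun e => h2 e.symm)
                        have h3B : (a == (['G', '1'] : List Char)) = false := beq_eq_false_iff_ne.mpr h3
                        have h3C : ((['G', '1'] : List Char) == a) = false := beq_eq_false_iff_ne.mpr (fun e => h3 e.symm)
                        have h4B : (a == (['G', '2'] : List Char)) = false := beq_eq_false_iff_ne.mpr h4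
                        have h4C : ((['G', '2'] : List Char) == a) = false := beq_eq_false_iff_ne.mpr (fun e => h4 e.symm)
                        have h5B : (a == (['G', '3'] : List Char)) = false := beq_eq_false_iff_ne.mpr h5
                        have h5C : ((['G', '3'] : List Char) == a) = false := beq_eq_false_iff_ne.mpr (fun e => h5 e.symm)
                        have h6B : (a == (['S', 'a'] : List Char)) = false := beq_eq_false_iff_ne.mpr h6
                        have h6C : ((['S', 'a'] : List Char) == a) = false := beq_eq_false_iff_ne.mpr (fun e => h6 e.symm)
                        have h7B : (a == (['P', 'a'] : List Char)) = false := beq_eq_false_iff_ne.mpr h7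
                        have h7C : ((['P', 'a'] : List Char) == a) = false := beq_eq_false_iff_ne.mpr (fun e => h7 e.symm)
                        have h8B : (a == (['N', '1'] : List Char)) = false := beq_eq_false_iff_ne.mpr h8
                        have h8C : ((['N', '1'] : List Char) == a) = false := beq_eq_false_iff_ne.mpr (fun e => h8 e.symm)
                        have h9B : (a == (['N', '2'] : List Char)) = false := beq_eq_false_iff_ne.mpr h9
                        have h9C : ((['N', '2'] : List Char) == a) = false := beq_eq_false_iff_ne.mpr (fun e => h9 e.symm)
                        have h10B : (a == (['D', '3'] : List Char)) = false := beq_eq_false_iff_ne.mpr h10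
                        have h10C : ((['D', '3'] : List Char) == a) = false := beq_eq_false_iff_ne.mpr (fun e => h10 e.symm)
                        by_cases g0 : b = (['M', 'a', '1'] : List Char)
                        · simp [PySem.Dict.get?, g0, h0B, h0C, h1B, h1C, h2B, h2C, h3B, h3C, h4B, h4C, h5B, h5C, h6B, h6C, h7C, h8C, h9C, h10C, na0C, na1C, na2C, na3C, na4C, na5C]
                        ·
                          by_cases g1 : b = (['M', 'a', '2'] : List Char)
                          · simp [PySem.Dict.get?, g1, h0B, h0C, h1B, h1C, h2B, h2C, h3B, h3C, h4B, h4C, h5B, h5C, h6B, h6C, h7C, h8C, h9C, h10C, na0C, na1C, na2C, na3C, na4C, na5C]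
                          ·
                            by_cases g2 : b = (['D', 'a', '1'] : List Char)
                            · simp [PySem.Dict.get?, g2, h0B, h0C, h1B, h1C, h2B, h2C, h3B, h3C, h4B, h4C, h5B, h5C, h6B, h6C, h7B, h7C, h8C, h9C, h10C, na0C, na1C, na2C, na3C, na4C, na5C]
                            ·
                              by_cases g3 : b = (['D', 'a', '2'] : List Char)
                              · simp [PySem.Dict.get?, g3, h0B, h0C, h1B, h1C, h2B, h2C, h3B, h3C, h4B, h4C, h5B, h5C, h6B, h6C, h7B, h7C, h8C, h9C, h10C, na0C, na1C, na2C, na3C, na4C, na5C]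
                              ·
                                by_cases g4 : b = (['D', 'a', '3'] : List Char)
                                · simp [PySem.Dict.get?, g4, h0B, h0C, h1B, h1C, h2B, h2C, h3B, h3C, h4B, h4C, h5B, h5C, h6B, h6C, h7B, h7C, h8C, h9C, h10C, na0C, na1C, na2C, na3C, na4C, na5C]
                                ·
                                  by_cases g5 : b = (['N', 'i', '3'] : List Char)
                                  · simp [PySem.Dict.get?, g5, h0B, h0C, h1B, h1C, h2B, h2C, h3B, h3C, h4B, h4C, h5B, h5C, h6B, h6C, h7B, h7C, h8B, h8C, h9B, h9C, h10C, na0C, na1C, na2C, na3C, na4C, na5C]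
                                  ·
                                    have c0 : ¬ (b = (['R', '1'] : List Char)) := fun e => h0 (by rw [e] at hab; simpa using hab)
                                    have c0C : ((['R', '1'] : List Char) == b) = false := beq_eq_false_iff_ne.mpr (fun e => c0 e.symm)
                                    have c1 : ¬ (b = (['R', '2'] : List Char)) := fun e => h1 (by rw [e] at hab; simpa using hab)
                                    have c1C : ((['R', '2'] : List Char) == b) = false := beq_eq_false_iff_ne.mpr (fun e => c1 e.symm)
                                    have c2 : ¬ (b = (['R', '3'] : List Char)) := fun e => h2 (by rw [e] at hab; simpa using hab)
                                    have c2C : ((['R', '3'] : List Char) == b) = false := beq_eq_false_iff_ne.mpr (fun e => c2 e.symm)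
                                    have c3 : ¬ (b = (['G', '1'] : List Char)) := fun e => h3 (by rw [e] at hab; simpa using hab)
                                    have c3C : ((['G', '1'] : List Char) == b) = false := beq_eq_false_iff_ne.mpr (fun e => c3 e.symm)
                                    have c4 : ¬ (b = (['G', '2'] : List Char)) := fun e => h4 (by rw [e] at hab; simpa using hab)
                                    have c4C : ((['G', '2'] : List Char) == b) = false := beq_eq_false_iff_ne.mpr (fun e => c4 e.symm)
                                    have c5 : ¬ (b = (['G', '3'] : List Char)) := fun e => h5 (by rw [e] at hab; simpa using hab)
                                    have c5C : ((['G', '3'] : List Char) == b) = false := beq_eq_false_iff_ne.mpr (fun e => c5 e.symm)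
                                    have c6 : ¬ (b = (['S', 'a'] : List Char)) := fun e => h6 (by rw [e] at hab; simpa using hab)
                                    have c6C : ((['S', 'a'] : List Char) == b) = false := beq_eq_false_iff_ne.mpr (fun e => c6 e.symm)
                                    have c7 : ¬ (b = (['P', 'a'] : List Char)) := fun e => h7 (by rw [e] at hab; simpa using hab)
                                    have c7C : ((['P', 'a'] : List Char) == b) = false := beq_eq_false_iff_ne.mpr (fun e => c7 e.symm)
                                    have c8 : ¬ (b = (['N', '1'] : List Char)) := fun e => h8 (by rw [e] at hab; simpa using hab)
                                    have c8C : ((['N', '1'] : List Char) == b) = false := beq_eq_false_iff_ne.mpr (fun e => c8 e.symm)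
                                    have c9 : ¬ (b = (['N', '2'] : List Char)) := fun e => h9 (by rw [e] at hab; simpa using hab)
                                    have c9C : ((['N', '2'] : List Char) == b) = false := beq_eq_false_iff_ne.mpr (fun e => c9 e.symm)
                                    have c10 : ¬ (b = (['D', '3'] : List Char)) := fun e => h10 (by rw [e] at hab; simpa using hab)
                                    have c10C : ((['D', '3'] : List Char) == b) = false := beq_eq_false_iff_ne.mpr (fun e => c10 e.symm)
                                    have g0B : (b == (['M', 'a', '1'] : List Char)) = false := beq_eq_false_iff_ne.mpr g0
                                    have g0C : ((['M', 'a', '1'] : List Char) == b) = false := beq_eq_false_iff_ne.mpr (fun e => g0 e.symm)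
                                    have g1B : (b == (['M', 'a', '2'] : List Char)) = false := beq_eq_false_iff_ne.mpr g1
                                    have g1C : ((['M', 'a', '2'] : List Char) == b) = false := beq_eq_false_iff_ne.mpr (fun e => g1 e.symm)
                                    have g2B : (b == (['D', 'a', '1'] : List Char)) = false := beq_eq_false_iff_ne.mpr g2
                                    have g2C : ((['D', 'a', '1'] : List Char) == b) = false := beq_eq_false_iff_ne.mpr (fun e => g2 e.symm)
                                    have g3B : (b == (['D', 'a', '2'] : List Char)) = false := beq_eq_false_iff_ne.mpr g3
                                    have g3C : ((['D', 'a', '2'] : List Char) == b) = false := beq_eq_false_iff_ne.mpr (fun e => g3 e.symm)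
                                    have g4B : (b == (['D', 'a', '3'] : List Char)) = false := beq_eq_false_iff_ne.mpr g4
                                    have g4C : ((['D', 'a', '3'] : List Char) == b) = false := beq_eq_false_iff_ne.mpr (fun e => g4 e.symm)
                                    have g5B : (b == (['N', 'i', '3'] : List Char)) = false := beq_eq_false_iff_ne.mpr g5
                                    have g5C : ((['N', 'i', '3'] : List Char) == b) = false := beq_eq_false_iff_ne.mpr (fun e => g5 e.symm)
                                    simp [PySem.Dict.get?, h0B, h0C, h1B, h1C, h2B, h2C, h3B, h3C, h4B, h4C, h5B, h5C, h6B, h6C, h7B, h7C, h8B, h8C, h9B, h9C, h10B, h10C, na0C, na1C, na2C, na3C, na4C, na5C, g0B, g0C, g1B, g1C, g2B, g2C, g3B, g3C, g4B, g4C, g5B, g5C, c0C, c1C, c2C, c3C, c4C, c5C, c6C, c7C, c8C, c9C, c10C]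

-- per-element value of the R1 arm: A's ordered startswith scan = B's two slice lookups
theorem pv_elem_R1 (s : String) :
    (PySem.Dict.ofList swaraMapListA).getD
        ((((PySem.Dict.ofList swaraMapListA).keys.find? (fun k => PySem.Str.startswith s k)).getD s)) s
      = sliceLookupB s := by
  rw [pv_ofList_eq_mk]
  have hk : (PySem.Dict.mk swaraMapListA).keys = swaraMapListA.map Prod.fst := by decide
  rw [hk]
  have hnd : (swaraMapListA.map Prod.fst).Nodup := by decide
  rw [pv_prefix_lookup swaraMapListA s hnd]
  exact pv_find_eq_slice s

-- per-element value of the non-R1 arm: the elif chain = lookup in the filtered rules dict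
theorem pv_elem_repl (c : String → Bool) (s : String) :
    (if c "R2" && s == "R3" then "G2"
     else if c "D1" && s == "D2" then "N1"
     else if c "D2" && s == "D3" then "N2" else s)
    = (PySem.Dict.ofList ((rulesB.filter (fun r => c r.1)).map (fun r => (r.2.1, r.2.2)))).getD s s := by
  cases hc2 : c "R2" <;> cases hc1 : c "D1" <;> cases hcD : c "D2" <;>
    by_cases e3 : s = "R3" <;> by_cases e2 : s = "D2" <;> by_cases e1 : s = "D3" <;>
      simp_all [rulesB, PySem.Dict.ofList, PySem.Dict.update, PySem.Dict.getD_insert, PySem.Dict.getD_empty]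

-- ===== VERDICT =====
theorem map_swaras_spec : Claim_equal_map_swaras := by
  intro swaras _
  unfold Spec_map_swaras map_swaras map_swaras_alt
  simp only [set_contains]
  by_cases h : swaras.contains "R1" = true
  · simp only [h, if_true]
    rw [show (swaras.foldl (fun out s => out ++ [sliceLookupB s]) [] : List String)
          = [] ++ swaras.map sliceLookupB from
        PySem.List.foldl_append_singleton_eq_map sliceLookupB swaras []]
    rw [show (swaras.foldl (fun acc s => acc ++
          [(PySem.Dict.ofList swaraMapListA).getD
            ((((PySem.Dict.ofList swaraMapListA).keys.find? (fun k => PySem.Str.startswith s k)).getD s)) s]) [] : List String)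
          = [] ++ swaras.map (fun s =>
            (PySem.Dict.ofList swaraMapListA).getD
              ((((PySem.Dict.ofList swaraMapListA).keys.find? (fun k => PySem.Str.startswith s k)).getD s)) s) from
        PySem.List.foldl_append_singleton_eq_map (fun s =>
            (PySem.Dict.ofList swaraMapListA).getD
              ((((PySem.Dict.ofList swaraMapListA).keys.find? (fun k => PySem.Str.startswith s k)).getD s)) s) swaras []]
    simp only [List.nil_append]
    exact List.map_congr_left (fun s _ => pv_elem_R1 s)
  · have h' : swaras.contains "R1" = false := by simpa using h
    simp only [h', Bool.false_eq_true, if_false]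
    rw [show (swaras.foldl (fun acc s =>
          if swaras.contains "R2" && s == "R3" then acc ++ ["G2"]
          else if swaras.contains "D1" && s == "D2" then acc ++ ["N1"]
          else if swaras.contains "D2" && s == "D3" then acc ++ ["N2"]
          else acc ++ [s]) [] : List String)
          = [] ++ swaras.map (fun s =>
            if swaras.contains "R2" && s == "R3" then "G2"
            else if swaras.contains "D1" && s == "D2" then "N1"
            else if swaras.contains "D2" && s == "D3" then "N2"
            else s) from by
      rw [show (fun (acc : List String) (s : String) =>
            if swaras.contains "R2" && s == "R3" then acc ++ ["G2"]
            else if swaras.contains "D1" && s == "D2" then acc ++ ["N1"]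
            else if swaras.contains "D2" && s == "D3" then acc ++ ["N2"]
            else acc ++ [s])
          = (fun (acc : List String) (s : String) => acc ++
            [if swaras.contains "R2" && s == "R3" then "G2"
             else if swaras.contains "D1" && s == "D2" then "N1"
             else if swaras.contains "D2" && s == "D3" then "N2"
             else s]) from by
        funext acc s
        split_ifs <;> rfl]
      exact PySem.List.foldl_append_singleton_eq_map (fun s =>
            if swaras.contains "R2" && s == "R3" then "G2"
            else if swaras.contains "D1" && s == "D2" then "N1"
            else if swaras.contains "D2" && s == "D3" then "N2"
            else s) swaras []]
    simp only [List.nil_append]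
    exact List.map_congr_left (fun s _ => pv_elem_repl (fun x => swaras.contains x) s)
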